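-- pv_equiv track=rewrite | github.com/Elevenv/Placement-Stuff | coronaVirusSpread.py | InfectedPeoples
-- ===== SOURCE A (Python) =====
-- def InfectedPeoples(n,l):
--     ans = []
--     temp = 1
--     for i in range(n-1):
--         if abs(l[i+1]-l[i])<=2:
--             temp+=1
--         else:
--             ans.append(temp)
--             temp = 1
--     ans.append(temp)
--     return min(ans),max(ans)
-- ===== SOURCE B (Python) =====
-- def InfectedPeoples(n, l):
--     s = ''.join('1' if abs(l[i + 1] - l[i]) <= 2 else '0' for i in range(n - 1))
--     runs = [len(p) + 1 for p in s.split('0')]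
--     return min(runs), max(runs)
-- ===== Notes on version B (the rewrite author's own statement) =====
-- stated objective: alternative
-- what changed: Replaces the stateful counter loop with appended partial results by encoding the adjacency test as a '0'/'1' bitmask string, splitting it on '0' and reading each run length off a part's length + 1.
import Mathlib
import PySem

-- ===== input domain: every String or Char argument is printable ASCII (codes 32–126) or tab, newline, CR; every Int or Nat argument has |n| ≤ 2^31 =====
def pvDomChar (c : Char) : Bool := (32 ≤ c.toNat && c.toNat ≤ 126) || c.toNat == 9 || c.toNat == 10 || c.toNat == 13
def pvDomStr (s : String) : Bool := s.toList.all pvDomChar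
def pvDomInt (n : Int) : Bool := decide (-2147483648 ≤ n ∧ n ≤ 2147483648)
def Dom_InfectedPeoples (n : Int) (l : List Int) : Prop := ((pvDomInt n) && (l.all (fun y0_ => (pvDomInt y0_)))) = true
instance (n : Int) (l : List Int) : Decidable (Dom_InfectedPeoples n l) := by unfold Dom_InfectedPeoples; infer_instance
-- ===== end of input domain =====

-- B replaces A's stateful counter loop by a '0'/'1' bitmask of the adjacency test, split on '0';
-- each part's length + 1 is a run length (alternative decomposition, same cost).


-- ===== PORT A =====
-- l[i] / l[i+1] ported as pyGetD … 0: Pre_ guarantees i+1 < len l, so the default is never read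
-- (on an out-of-range index the Python raises IndexError; Pre_ excludes exactly those inputs).
def InfectedPeoples (n : Int) (l : List Int) : Int × Int :=
  let st := (PySem.List.pyRange 0 (n - 1) 1).foldl
      (fun (st : List Int × Int) i =>
        if |PySem.List.pyGetD l (i + 1) 0 - PySem.List.pyGetD l i 0| ≤ 2
        then (st.1, st.2 + 1)
        else (st.1 ++ [st.2], 1))
      ([], 1)
  let ans := st.1 ++ [st.2]
  ((PySem.List.min? ans id).getD 0, (PySem.List.max? ans id).getD 0)

-- ===== PORT B =====
-- ''.join over the generator = the list of mask characters; s.split('0') = PySem.Chars.splitOn;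
-- min/max on the (always nonempty) runs list via PySem.List.min?/max? (the default is never read).
def InfectedPeoples_alt (n : Int) (l : List Int) : Int × Int :=
  let s : List Char := (PySem.List.pyRange 0 (n - 1) 1).map
      (fun i => if |PySem.List.pyGetD l (i + 1) 0 - PySem.List.pyGetD l i 0| ≤ 2 then '1' else '0')
  let runs := (PySem.Chars.splitOn s ['0']).map (fun p => (p.length : Int) + 1)
  ((PySem.List.min? runs id).getD 0, (PySem.List.max? runs id).getD 0)

-- ===== PRECONDITION & SPEC =====
-- Pre_ excludes exactly the inputs on which the Python A raises IndexError: when 2 ≤ n the loop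
-- reads l[0] … l[n-1], so n must not exceed len(l).
def Pre_InfectedPeoples (n : Int) (l : List Int) : Prop := n ≤ 1 ∨ n ≤ (l.length : Int)
instance (n : Int) (l : List Int) : Decidable (Pre_InfectedPeoples n l) := by
  unfold Pre_InfectedPeoples; infer_instance
def pvWitness_InfectedPeoples : Int × List Int := (5, [1, 2, 9, 10, 11])

def Spec_InfectedPeoples (n : Int) (l : List Int) (out : Int × Int) : Prop := out = InfectedPeoples_alt n l
instance (n : Int) (l : List Int) (out : Int × Int) : Decidable (Spec_InfectedPeoples n l out) := by unfold Spec_InfectedPeoples; infer_instance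

-- ===== CLAIM (what is proved, stated in full; the proofs are below) =====
def Claim_equal_InfectedPeoples : Prop := ∀ (n : Int) (l : List Int), Dom_InfectedPeoples n l → Pre_InfectedPeoples n l → Spec_InfectedPeoples n l (InfectedPeoples n l)

-- ===== LEMMAS AND PROOFS =====

-- Simple recursive specification of splitting a char list on the single character '0'.
def pvSplit0 : List Char → List (List Char)
  | [] => [[]]
  | c :: cs => if c = '0' then [] :: pvSplit0 cs else (pvSplit0 cs).modifyHead (c :: ·)

theorem pvSplit0_ne_nil (cs : List Char) : pvSplit0 cs ≠ [] := by
  cases cs with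
  | nil => simp [pvSplit0]
  | cons c cs =>
    simp only [pvSplit0]
    split
    · simp
    · cases h : pvSplit0 cs with
      | nil => exact absurd h (pvSplit0_ne_nil cs)
      | cons p ps => simp [List.modifyHead]

theorem pvSplitOn_go_eq (fuel : Nat) : ∀ (s cur : List Char) (acc : List (List Char)),
    s.length < fuel →
    PySem.Chars.splitOn.go ['0'] fuel s cur acc
      = acc.reverse ++ (pvSplit0 s).modifyHead (cur.reverse ++ ·) := by
  induction fuel with
  | zero => intro s cur acc h; omega
  | succ f ih =>
    intro s cur acc h
    cases s with
    | nil => simp [PySem.Chars.splitOn.go, pvSplit0]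
    | cons c rest =>
      rw [PySem.Chars.splitOn.go]
      by_cases hc : c = '0'
      · subst hc
        have hpref : List.isPrefixOf ['0'] ('0' :: rest) = true := by
          simp [List.isPrefixOf]
        rw [if_pos hpref]
        rw [show List.drop (['0'] : List Char).length ('0' :: rest) = rest from rfl]
        rw [ih rest [] (cur.reverse :: acc) (by simp at h ⊢; omega)]
        rw [show pvSplit0 ('0' :: rest) = [] :: pvSplit0 rest from by simp [pvSplit0]]
        cases hs : pvSplit0 rest with
        | nil => exact absurd hs (pvSplit0_ne_nil rest)
        | cons p ps => simp [List.modifyHead]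
      · have hpref : List.isPrefixOf ['0'] (c :: rest) = false := by
          simp [List.isPrefixOf]; exact fun h' => absurd h'.symm hc
        rw [if_neg (by simp [hpref])]
        rw [ih rest (c :: cur) acc (by simp at h ⊢; omega)]
        rw [show pvSplit0 (c :: rest) = (pvSplit0 rest).modifyHead (c :: ·) from by
          simp [pvSplit0, hc]]
        cases hs : pvSplit0 rest with
        | nil => exact absurd hs (pvSplit0_ne_nil rest)
        | cons p ps => simp [List.modifyHead]

theorem pvSplitOn_eq (s : List Char) :
    PySem.Chars.splitOn s ['0'] = pvSplit0 s := by
  rw [PySem.Chars.splitOn, pvSplitOn_go_eq (s.length + 1) s [] [] (by omega)]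
  cases h : pvSplit0 s with
  | nil => exact absurd h (pvSplit0_ne_nil s)
  | cons p ps => simp [List.modifyHead]

-- A's counter loop, read over the mask characters, related to pvSplit0 of the mask.
theorem pvLoop_eq_runs : ∀ (cs : List Char) (ans : List Int) (temp : Int),
    (cs.foldl
        (fun (st : List Int × Int) c => if c = '0' then (st.1 ++ [st.2], 1) else (st.1, st.2 + 1))
        (ans, temp)).1
      ++ [(cs.foldl
        (fun (st : List Int × Int) c => if c = '0' then (st.1 ++ [st.2], 1) else (st.1, st.2 + 1))
        (ans, temp)).2]
    = ans ++ ((pvSplit0 cs).map (fun p => (p.length : Int) + 1)).modifyHead (· + (temp - 1)) := by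
  intro cs
  induction cs with
  | nil =>
    intro ans temp
    simp only [List.foldl_nil, pvSplit0, List.map_cons, List.map_nil, List.modifyHead,
      List.length_nil]
    norm_num
  | cons c cs ih =>
    intro ans temp
    rw [List.foldl_cons]
    by_cases hc : c = '0'
    · subst hc
      rw [if_pos rfl, ih (ans ++ [temp]) 1]
      rw [show pvSplit0 ('0' :: cs) = [] :: pvSplit0 cs from by simp [pvSplit0]]
      cases hs : pvSplit0 cs with
      | nil => exact absurd hs (pvSplit0_ne_nil _)
      | cons p ps => simp [List.modifyHead]
    · rw [if_neg hc, ih ans (temp + 1)]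
      rw [show pvSplit0 (c :: cs) = (pvSplit0 cs).modifyHead (c :: ·) from by
        simp [pvSplit0, hc]]
      cases hs : pvSplit0 cs with
      | nil => exact absurd hs (pvSplit0_ne_nil _)
      | cons p ps =>
        simp only [List.modifyHead, List.map_cons, List.length_cons]
        rw [List.append_cancel_left_eq]
        congr 1
        push_cast
        ring

-- ===== VERDICT (by name: the statement is the Claim_ definition above) =====
theorem InfectedPeoples_spec : Claim_equal_InfectedPeoples := by
  intro n l _ _
  show InfectedPeoples n l = InfectedPeoples_alt n l
  unfold InfectedPeoples InfectedPeoples_alt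
  simp only [pvSplitOn_eq]
  have hstep :
      (fun (st : List Int × Int) i =>
        if |PySem.List.pyGetD l (i + 1) 0 - PySem.List.pyGetD l i 0| ≤ 2
        then (st.1, st.2 + 1) else (st.1 ++ [st.2], 1))
      = (fun (st : List Int × Int) i =>
          if (if |PySem.List.pyGetD l (i + 1) 0 - PySem.List.pyGetD l i 0| ≤ 2
              then '1' else '0') = '0'
          then (st.1 ++ [st.2], 1) else (st.1, st.2 + 1)) := by
    funext st i
    by_cases h : |PySem.List.pyGetD l (i + 1) 0 - PySem.List.pyGetD l i 0| ≤ 2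
    · rw [if_pos h, if_pos h, if_neg (by decide : ¬ ('1' : Char) = '0')]
    · rw [if_neg h, if_neg h, if_pos rfl]
  rw [hstep, show
      ((PySem.List.pyRange 0 (n - 1) 1).foldl
        (fun (st : List Int × Int) i =>
          if (if |PySem.List.pyGetD l (i + 1) 0 - PySem.List.pyGetD l i 0| ≤ 2
              then '1' else '0') = '0'
          then (st.1 ++ [st.2], 1) else (st.1, st.2 + 1)) ([], 1))
      = ((PySem.List.pyRange 0 (n - 1) 1).map
          (fun i => if |PySem.List.pyGetD l (i + 1) 0 - PySem.List.pyGetD l i 0| ≤ 2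
                    then '1' else '0')).foldl
          (fun (st : List Int × Int) c => if c = '0' then (st.1 ++ [st.2], 1) else (st.1, st.2 + 1))
          ([], 1)
    from by rw [List.foldl_map]]
  have hkey := pvLoop_eq_runs
      ((PySem.List.pyRange 0 (n - 1) 1).map
        (fun i => if |PySem.List.pyGetD l (i + 1) 0 - PySem.List.pyGetD l i 0| ≤ 2 then '1' else '0'))
      [] 1
  have hmod : ∀ (xs : List Int), xs.modifyHead (· + (1 - 1)) = xs := by
    intro xs; cases xs with
    | nil => rfl
    | cons x xs => simp [List.modifyHead]
  rw [hmod, List.nil_append] at hkey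
  rw [hkey]
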